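-- pv_equiv track=rewrite | github.com/dibasferr/TI-trabalho-pratico-2 | gzip.py | contagemComprimentos
-- ===== SOURCE A (Python) =====
-- def contagemComprimentos(comprimentos, maxComp):
--     array = [0] * (maxComp + 1)  # Cria um array com tamanho do maior comprimento + 1, para que inclua tambem esse elemento no array
--     for i in range(maxComp + 1):
--         count = 0
--         for j in comprimentos:
--             if(j == i):
--                 count += 1
--         array[i] = count
--     return array
-- ===== SOURCE B (Python) =====
-- def contagemComprimentos(comprimentos, maxComp):
--     counts = {}
--     for j in comprimentos:
--         counts[j] = counts.get(j, 0) + 1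
--     return [counts.get(i, 0) for i in range(maxComp + 1)]
-- ===== Notes on version B (the rewrite author's own statement) =====
-- stated objective: faster
-- what changed: Builds a dict of occurrence counts in one pass over the list and reads each length 0..maxComp out of it, instead of rescanning the whole list once per length.
import Mathlib
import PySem

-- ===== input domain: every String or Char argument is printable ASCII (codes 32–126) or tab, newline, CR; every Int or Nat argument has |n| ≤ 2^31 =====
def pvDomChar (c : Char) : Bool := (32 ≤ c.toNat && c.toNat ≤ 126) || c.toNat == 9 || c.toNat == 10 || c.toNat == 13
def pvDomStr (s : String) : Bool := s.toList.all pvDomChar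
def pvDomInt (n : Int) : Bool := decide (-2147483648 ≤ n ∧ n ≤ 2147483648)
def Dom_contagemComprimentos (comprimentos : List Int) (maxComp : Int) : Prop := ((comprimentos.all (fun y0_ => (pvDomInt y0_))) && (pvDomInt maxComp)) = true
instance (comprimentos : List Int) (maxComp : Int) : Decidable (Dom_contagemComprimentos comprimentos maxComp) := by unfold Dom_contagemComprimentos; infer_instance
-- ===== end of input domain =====

-- B replaces A's per-length rescan with a one-pass count dictionary (asymptotically faster).
-- ===== PORT A =====
def contagemComprimentos (comprimentos : List Int) (maxComp : Int) : List Int :=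
  let array : List Int := List.replicate (maxComp + 1).toNat 0
  (PySem.List.pyRange 0 (maxComp + 1) 1).foldl (fun arr i =>
    let count : Int := comprimentos.foldl (fun cnt j => if j == i then cnt + 1 else cnt) 0
    arr.set i.toNat count) array

-- ===== PORT B =====
def contagemComprimentos_alt (comprimentos : List Int) (maxComp : Int) : List Int :=
  let counts : PySem.Dict Int Int :=
    comprimentos.foldl (fun d j => d.insert j (d.getD j 0 + 1)) PySem.Dict.empty
  (PySem.List.pyRange 0 (maxComp + 1) 1).map (fun i => counts.getD i 0)

-- ===== PRECONDITION & SPEC =====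
def Spec_contagemComprimentos (comprimentos : List Int) (maxComp : Int) (out : List Int) : Prop := out = contagemComprimentos_alt comprimentos maxComp
instance (comprimentos : List Int) (maxComp : Int) (out : List Int) : Decidable (Spec_contagemComprimentos comprimentos maxComp out) := by unfold Spec_contagemComprimentos; infer_instance

-- ===== CLAIM (what is proved, stated in full; the proofs are below) =====
def Claim_equal_contagemComprimentos : Prop := ∀ (comprimentos : List Int) (maxComp : Int), Dom_contagemComprimentos comprimentos maxComp → Spec_contagemComprimentos comprimentos maxComp (contagemComprimentos comprimentos maxComp)

-- ===== LEMMAS AND PROOFS =====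

-- Writing count i at slot i, for i = 0..k-1 in order, into any list of length ≥ k
-- produces the map of counts on the written prefix.
theorem pv_fold_set_eq_map (f : Int → Int) : ∀ (k : Nat) (arr : List Int), k ≤ arr.length →
    (PySem.List.pyRange 0 (k : Int) 1).foldl (fun arr i => arr.set i.toNat (f i)) arr
      = (PySem.List.pyRange 0 (k : Int) 1).map f ++ arr.drop k := by
  intro k
  induction k with
  | zero => intro arr _; simp [PySem.List.pyRange_one_eq_nil]
  | succ k ih =>
    intro arr hk
    have hklt : k < arr.length := by omega
    have hcast : ((k + 1 : Nat) : Int) = (k : Int) + 1 := by push_cast; ring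
    rw [hcast, PySem.List.pyRange_one_succ_right (by positivity),
        List.foldl_append, List.map_append, ih arr (by omega)]
    have hlen : ((PySem.List.pyRange 0 (k : Int) 1).map f).length = k := by
      simp [PySem.List.length_pyRange_one]
    rw [List.drop_eq_getElem_cons hklt]
    simp only [List.foldl_cons, List.foldl_nil, List.map_cons, List.map_nil]
    rw [List.set_append, hlen]
    simp
    rw [List.drop_eq_getElem_cons hklt, List.set_cons_zero]

theorem pv_counts_getD (comprimentos : List Int) (i : Int) :
    (comprimentos.foldl (fun d j => d.insert j (d.getD j 0 + 1)) PySem.Dict.empty).getD i 0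
      = (comprimentos.count i : Int) := by
  rw [PySem.Dict.getD_foldl_insert_add_one]
  simp [PySem.Dict.getD, PySem.Dict.empty, PySem.Dict.get?]

-- ===== VERDICT (by name: the statement is the Claim_ definition above) =====
theorem contagemComprimentos_spec : Claim_equal_contagemComprimentos := by
  intro c m _
  unfold Spec_contagemComprimentos contagemComprimentos contagemComprimentos_alt
  by_cases h : m + 1 ≤ 0
  · simp [PySem.List.pyRange_one_eq_nil h, Int.toNat_of_nonpos h]
  · push Not at h
    have hk : (m + 1) = (((m + 1).toNat : Nat) : Int) := by omega
    rw [hk, pv_fold_set_eq_map _ _ (List.replicate _ 0) (by simp)]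
    simp only [List.drop_replicate, Int.toNat_natCast, Nat.sub_self, List.replicate_zero,
      List.append_nil]
    refine List.map_congr_left (fun i _ => ?_)
    rw [pv_counts_getD, PySem.List.foldl_beq_add_one]
    simp
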